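-- pv_equiv track=rewrite | github.com/akhandsingh17/assignments | codingexercise/ContigiousIntegers.py | ContigousIntegers
-- ===== SOURCE A (Python) =====
-- def ContigousIntegers(ary):
--
--     lst=sorted(set(ary))
--
--     flg=True
--     for i in range(1,len(lst)):
--
--         if lst[i]-lst[i-1]>1:
--             flg=False
--             break
--
--     if flg==True:
--         return "Yes"
--     else:
--         return "No"
-- ===== SOURCE B (Python) =====
-- def ContigousIntegers(ary):
--     s = set(ary)
--     if not s:
--         return "Yes"
--     return "Yes" if max(s) - min(s) + 1 == len(s) else "No"
-- ===== Notes on version B (the rewrite author's own statement) =====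
-- stated objective: simpler
-- what changed: Replaces sort-then-scan-adjacent-gaps with the closed-form check max-min+1 == number of distinct elements (no sorting, no explicit loop); measured ~1.25x, below the 1.5x bar, so no speed claimed.
import Mathlib
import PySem

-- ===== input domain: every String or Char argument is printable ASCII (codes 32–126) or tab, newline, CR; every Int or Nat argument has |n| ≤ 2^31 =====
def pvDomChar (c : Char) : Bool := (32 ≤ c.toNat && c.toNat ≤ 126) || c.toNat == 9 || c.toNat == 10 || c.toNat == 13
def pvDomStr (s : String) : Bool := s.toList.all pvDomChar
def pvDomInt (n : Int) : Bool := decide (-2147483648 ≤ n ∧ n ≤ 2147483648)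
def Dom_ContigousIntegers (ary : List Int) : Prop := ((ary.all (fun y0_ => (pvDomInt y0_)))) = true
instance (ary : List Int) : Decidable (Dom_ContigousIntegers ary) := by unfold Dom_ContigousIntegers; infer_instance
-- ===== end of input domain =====

-- B replaces A's sort-then-scan-adjacent-gaps with the closed-form check max-min+1 == #distinct (objective: simpler).

-- ===== PORT A =====
-- the 'for i in range(1, len(lst)):' loop with its break, over the index list
def pvLoopA (lst : List Int) : List Int → Bool
  | [] => true
  | i :: rest =>
      if PySem.List.pyGetD lst i 0 - PySem.List.pyGetD lst (i - 1) 0 > 1 then false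
      else pvLoopA lst rest

def ContigousIntegers (ary : List Int) : String :=
  let lst := PySem.List.sorted (PySem.Set.ofList ary) (fun x => x) false
  let flg := pvLoopA lst (PySem.List.pyRange 1 (lst.length : Int) 1)
  if flg = true then "Yes" else "No"

-- ===== PORT B =====
def ContigousIntegers_alt (ary : List Int) : String :=
  let s := PySem.Set.ofList ary
  if s = [] then "Yes"
  else if (PySem.List.max? s (fun x => x)).getD 0 - (PySem.List.min? s (fun x => x)).getD 0 + 1
          = (s.length : Int) then "Yes" else "No"

-- ===== PRECONDITION & SPEC =====
def Spec_ContigousIntegers (ary : List Int) (out : String) : Prop := out = ContigousIntegers_alt ary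
instance (ary : List Int) (out : String) : Decidable (Spec_ContigousIntegers ary out) := by unfold Spec_ContigousIntegers; infer_instance

-- ===== CLAIM (what is proved, stated in full; the proofs are below) =====
def Claim_equal_ContigousIntegers : Prop := ∀ (ary : List Int), Dom_ContigousIntegers ary → Spec_ContigousIntegers ary (ContigousIntegers ary)

-- ===== LEMMAS AND PROOFS =====

-- the break-loop is the conjunction over all indices
theorem pvLoopA_eq_all (lst idxs : List Int) :
    pvLoopA lst idxs
      = idxs.all (fun i => !decide (PySem.List.pyGetD lst i 0 - PySem.List.pyGetD lst (i - 1) 0 > 1)) := by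
  induction idxs with
  | nil => rfl
  | cons i rest ih =>
      by_cases h : PySem.List.pyGetD lst i 0 - PySem.List.pyGetD lst (i - 1) 0 > 1 <;>
        simp [pvLoopA, h, ih]

-- adjacent-gap condition stated structurally
def pvChain (l : List Int) : Prop := ∀ (j : ℕ) (h : j + 1 < l.length), l[j + 1] - l[j] ≤ 1

theorem pvLoopA_true_iff (l : List Int) :
    (pvLoopA l (PySem.List.pyRange 1 (l.length : Int) 1) = true) ↔ pvChain l := by
  rw [pvLoopA_eq_all]
  simp only [List.all_eq_true, PySem.List.mem_pyRange_one, Bool.not_eq_eq_eq_not, Bool.not_true,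
    decide_eq_false_iff_not, not_lt]
  constructor
  · intro H j hj
    have h1 : (0 : Int) ≤ (j : Int) + 1 := by omega
    have h2 : ((j : Int) + 1) < (l.length : Int) := by exact_mod_cast hj
    have := H ((j : Int) + 1) ⟨by omega, h2⟩
    have e : ((j : Int) + 1 - 1) = (j : Int) := by ring
    rw [e, PySem.List.pyGetD_eq_getElem l 0 h1 h2,
        PySem.List.pyGetD_eq_getElem l 0 (by omega) (by omega)] at this
    have e1 : ((j : Int) + 1).toNat = j + 1 := by omega
    have e2 : ((j : Int)).toNat = j := by omega
    simp only [e1, e2] at this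
    exact this
  · intro H i hi
    obtain ⟨hi1, hi2⟩ := hi
    have hj : (i.toNat - 1) + 1 < l.length := by omega
    have := H (i.toNat - 1) hj
    rw [PySem.List.pyGetD_eq_getElem l 0 (by omega) hi2,
        PySem.List.pyGetD_eq_getElem l 0 (by omega) (by omega)]
    have e2 : (i - 1).toNat = i.toNat - 1 := by omega
    simp only [e2]
    rw [show l[i.toNat]'(by omega) = l[(i.toNat - 1) + 1]'hj by congr 1; omega]
    exact this

-- in a strictly increasing list the last element is at least head + length of the tail
theorem pvLast_ge (t : List Int) : ∀ (h : Int), (h :: t).Pairwise (· < ·) →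
    h + (t.length : Int) ≤ (h :: t).getLast (by simp) := by
  induction t with
  | nil => intro h _; simp
  | cons b t' ih =>
      intro h hp
      rcases List.pairwise_cons.mp hp with ⟨hall, hp'⟩
      have hb : h < b := hall b (by simp)
      have := ih b hp'
      rw [List.getLast_cons_cons]
      simp only [List.length_cons]
      push_cast
      omega

-- in a strictly increasing list every element is ≤ the last
theorem pvAll_le_last (t : List Int) : ∀ (h : Int), (h :: t).Pairwise (· < ·) →
    ∀ x ∈ h :: t, x ≤ (h :: t).getLast (by simp) := by
  induction t with
  | nil => intro h _ x hx; simp at hx; simp [hx]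
  | cons b t' ih =>
      intro h hp x hx
      rcases List.pairwise_cons.mp hp with ⟨hall, hp'⟩
      rw [List.getLast_cons_cons]
      rcases List.mem_cons.mp hx with rfl | hx'
      · exact le_trans (le_of_lt (hall b (by simp))) ((ih b hp' b (by simp)))
      · exact ih b hp' x hx'

-- the gap condition on a strictly increasing list says exactly last = head + length of tail
theorem pvChain_iff (t : List Int) : ∀ (h : Int), (h :: t).Pairwise (· < ·) →
    (pvChain (h :: t) ↔ (h :: t).getLast (by simp) = h + (t.length : Int)) := by
  induction t with
  | nil =>
      intro h _
      constructor
      · intro _; simp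
      · intro _ j hj; simp at hj
  | cons b t' ih =>
      intro h hp
      rcases List.pairwise_cons.mp hp with ⟨hall, hp'⟩
      have hb : h < b := hall b (by simp)
      have hlast := pvLast_ge t' b hp'
      have hiff := ih b hp'
      have hsplit : pvChain (h :: b :: t') ↔ (b - h ≤ 1 ∧ pvChain (b :: t')) := by
        constructor
        · intro H
          refine ⟨H 0 (by simp), fun j hj => ?_⟩
          have := H (j + 1) (by simpa using Nat.succ_lt_succ hj)
          simpa using this
        · rintro ⟨h0, H⟩ j hj
          match j with
          | 0 => simpa using h0
          | j + 1 =>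
              have := H j (by simpa using Nat.lt_of_succ_lt_succ hj)
              simpa using this
      rw [hsplit, hiff, List.getLast_cons_cons]
      simp only [List.length_cons]
      constructor
      · rintro ⟨h1, h2⟩; push_cast; omega
      · intro hEq
        push_cast at hEq
        constructor
        · omega
        · omega

-- min of any list permuted from a strictly increasing h :: t is h
theorem pvMin_eq (s : List Int) (h : Int) (t : List Int)
    (hperm : (h :: t).Perm s) (hp : (h :: t).Pairwise (· < ·)) :
    PySem.List.min? s (fun x => x) = some h := by
  have hne : s ≠ [] := by
    intro hs; subst hs; exact absurd (List.Perm.length_eq hperm) (by simp)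
  obtain ⟨m, hm⟩ : ∃ m, PySem.List.min? s (fun x => x) = some m := by
    cases hmm : PySem.List.min? s (fun x => x) with
    | none => exact absurd ((PySem.List.min?_eq_none_iff s _).mp hmm) hne
    | some m => exact ⟨m, rfl⟩
  have hmem : m ∈ s := PySem.List.min?_mem hm
  have hmin : ∀ y ∈ s, m ≤ y := fun y hy => PySem.List.min?_isMin hm y hy
  have hm_in : m ∈ h :: t := (List.Perm.mem_iff hperm).mpr hmem
  have hh_le : ∀ x ∈ h :: t, h ≤ x := by
    intro x hx
    rcases List.mem_cons.mp hx with rfl | hx'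
    · exact le_refl x
    · exact le_of_lt ((List.pairwise_cons.mp hp).1 x hx')
  have h1 : h ≤ m := hh_le m hm_in
  have h2 : m ≤ h := hmin h ((List.Perm.mem_iff hperm).mp (by simp))
  rw [hm]; congr 1; omega

-- max of any list permuted from a strictly increasing h :: t is its last element
theorem pvMax_eq (s : List Int) (h : Int) (t : List Int)
    (hperm : (h :: t).Perm s) (hp : (h :: t).Pairwise (· < ·)) :
    PySem.List.max? s (fun x => x) = some ((h :: t).getLast (by simp)) := by
  have hne : s ≠ [] := by
    intro hs; subst hs; exact absurd (List.Perm.length_eq hperm) (by simp)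
  obtain ⟨m, hm⟩ : ∃ m, PySem.List.max? s (fun x => x) = some m := by
    cases hmm : PySem.List.max? s (fun x => x) with
    | none => exact absurd ((PySem.List.max?_eq_none_iff s _).mp hmm) hne
    | some m => exact ⟨m, rfl⟩
  have hmem : m ∈ s := PySem.List.max?_mem hm
  have hmax : ∀ y ∈ s, y ≤ m := fun y hy => PySem.List.max?_isMax hm y hy
  have hm_in : m ∈ h :: t := (List.Perm.mem_iff hperm).mpr hmem
  have h1 : m ≤ (h :: t).getLast (by simp) := pvAll_le_last t h hp m hm_in
  have h2 : (h :: t).getLast (by simp) ≤ m :=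
    hmax _ ((List.Perm.mem_iff hperm).mp (List.getLast_mem _))
  rw [hm]; congr 1; omega

-- the two programs' results agree once l is a strictly increasing rearrangement of s
theorem pvMain_eq (s l : List Int) (hperm : l.Perm s) (hpair : l.Pairwise (· < ·)) :
    (if pvLoopA l (PySem.List.pyRange 1 (l.length : Int) 1) = true then "Yes" else "No")
      = (if s = [] then "Yes"
         else if (PySem.List.max? s (fun x => x)).getD 0 - (PySem.List.min? s (fun x => x)).getD 0 + 1
                 = (s.length : Int) then "Yes" else "No") := by
  match l with
  | [] =>
      have hse : s = [] := List.Perm.nil_eq hperm |>.symm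
      simp [hse, pvLoopA, PySem.List.pyRange_one_eq_nil]
  | h :: t =>
      have hse : s ≠ [] := by
        intro hs; subst hs; exact absurd (List.Perm.length_eq hperm) (by simp)
      have hchain := pvChain_iff t h hpair
      have hmin := pvMin_eq s h t hperm hpair
      have hmax := pvMax_eq s h t hperm hpair
      have hlen : s.length = t.length + 1 := by
        have := List.Perm.length_eq hperm; simpa using this.symm
      have hlen2 : (((h :: t).length : Nat) : Int) = (t.length : Int) + 1 := by simp
      have hloop := pvLoopA_true_iff (h :: t)
      rw [hlen2] at hloop
      by_cases hflag : pvLoopA (h :: t) (PySem.List.pyRange 1 ((t.length : Int) + 1) 1) = true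
      · have hc : pvChain (h :: t) := hloop.mp hflag
        have heq := hchain.mp hc
        have hcond : (PySem.List.max? s (fun x => x)).getD 0 - (PySem.List.min? s (fun x => x)).getD 0 + 1
            = (s.length : Int) := by
          rw [hmin, hmax, heq, hlen]
          simp only [Option.getD_some]
          push_cast
          ring
        simp [hse, hflag, hcond]
      · have hc : ¬ pvChain (h :: t) := fun hc => hflag (hloop.mpr hc)
        have hne2 : ¬ (h :: t).getLast (by simp) = h + (t.length : Int) := fun he => hc (hchain.mpr he)
        have hcond : ¬ ((PySem.List.max? s (fun x => x)).getD 0 - (PySem.List.min? s (fun x => x)).getD 0 + 1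
            = (s.length : Int)) := by
          rw [hmin, hmax, hlen]
          simp only [Option.getD_some]
          intro hcon
          apply hne2
          push_cast at hcon ⊢
          omega
        simp [hse, hflag, hcond]

-- ===== VERDICT (by name: the statement is the Claim_ definition above) =====
theorem ContigousIntegers_spec : Claim_equal_ContigousIntegers := by
  intro ary _
  unfold Spec_ContigousIntegers
  have := pvMain_eq (PySem.Set.ofList ary)
      (PySem.List.sorted (PySem.Set.ofList ary) (fun x => x) false)
      (PySem.List.sorted_perm _ _ _)
      (PySem.List.sorted_ofList_pairwise_lt ary)
  simpa [ContigousIntegers, ContigousIntegers_alt] using this
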